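-- pv_equiv track=rewrite | github.com/KyoungSooKim/Coding-Test-Practice | programmers/예산.py | solution
-- ===== SOURCE A (Python) =====
-- def solution(budgets, M):
--     answer = 0
--     right = M
--     left = 1
--     if sum(budgets) <= M:
--         return max(budgets)
--     while left <= right:
--         mid = (right + left)//2
--         s = 0
--         for x in budgets:
--             if mid >= x:
--                 s += x
--             else:
--                 s += mid
--         if s > M:
--             right = mid - 1
--         else:
--             answer = mid
--             left = mid + 1
--     return answer
-- ===== SOURCE B (Python) =====
-- def solution(budgets, M):
--     if sum(budgets) <= M:
--         return max(budgets)
--     bs = sorted(budgets)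
--     n = len(bs)
--     prefix = 0
--     for i, x in enumerate(bs):
--         if prefix + (n - i) * x > M:
--             return max(0, min(M, (M - prefix) // (n - i)))
--         prefix += x
--     return 0
-- ===== Notes on version B (the rewrite author's own statement) =====
-- stated objective: alternative
-- what changed: Replaced A's binary search over the cap value (which re-sums all budgets on every probe) by sort + one prefix-sum scan that locates the linear segment containing the answer and closes it with a single floor division clamped to [0, M].
import Mathlib
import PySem

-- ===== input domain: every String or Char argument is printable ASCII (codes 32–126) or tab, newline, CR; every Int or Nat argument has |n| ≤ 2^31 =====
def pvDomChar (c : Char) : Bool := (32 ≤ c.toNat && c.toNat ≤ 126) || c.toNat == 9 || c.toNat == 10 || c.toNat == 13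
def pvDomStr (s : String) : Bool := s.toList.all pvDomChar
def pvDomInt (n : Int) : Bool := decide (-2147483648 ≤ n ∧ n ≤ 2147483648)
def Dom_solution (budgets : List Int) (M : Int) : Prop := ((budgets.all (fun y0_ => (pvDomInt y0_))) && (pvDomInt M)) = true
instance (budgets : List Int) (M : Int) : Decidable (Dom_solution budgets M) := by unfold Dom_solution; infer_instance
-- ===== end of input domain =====

-- B replaces A's binary search over the cap (which re-sums all budgets on each probe) by
-- sort + one prefix-sum scan locating the linear segment of the answer, closed by one floor division.

-- ===== PORT A =====
-- the inner 'for x in budgets: s += x if mid >= x else mid' loop of A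
def sumCapped (budgets : List Int) (mid : Int) : Int :=
  budgets.foldl (fun s x => if mid ≥ x then s + x else s + mid) 0

-- A's 'while left <= right' binary search, state (answer, left, right)
def solLoop (budgets : List Int) (M : Int) (answer left right : Int) : Int :=
  if _h : left ≤ right then
    if sumCapped budgets (PySem.Int.floordiv (right + left) 2) > M then
      solLoop budgets M answer left (PySem.Int.floordiv (right + left) 2 - 1)
    else
      solLoop budgets M (PySem.Int.floordiv (right + left) 2) (PySem.Int.floordiv (right + left) 2 + 1) right
  else answer
termination_by (right + 1 - left).toNat
decreasing_by
  · have hb := PySem.Int.floordiv_two_mid_bounds (lo := left) (hi := right) _h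
    rw [Int.add_comm] at hb
    omega
  · have hb := PySem.Int.floordiv_two_mid_bounds (lo := left) (hi := right) _h
    rw [Int.add_comm] at hb
    omega

def solution (budgets : List Int) (M : Int) : Int :=
  if budgets.sum ≤ M then (PySem.List.max? budgets (fun y => y)).getD 0
  else solLoop budgets M 0 1 M

-- ===== PORT B =====
-- B's 'for i, x in enumerate(bs)' scan over the sorted list, carrying (i, prefix)
def altLoop (M n : Int) : List Int → Int → Int → Int
  | [], _, _ => 0
  | x :: rest, i, pfx =>
    if pfx + (n - i) * x > M then
      max 0 (min M (PySem.Int.floordiv (M - pfx) (n - i)))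
    else altLoop M n rest (i + 1) (pfx + x)

def solution_alt (budgets : List Int) (M : Int) : Int :=
  if budgets.sum ≤ M then (PySem.List.max? budgets (fun y => y)).getD 0
  else altLoop M (budgets.length : Int) (PySem.List.sorted budgets (fun y => y)) 0 0

-- ===== PRECONDITION & SPEC =====
-- Pre_ excludes only the inputs where the Python A raises: budgets = [] with 0 ≤ M reaches max([]) (ValueError; B raises there too).
def Pre_solution (budgets : List Int) (M : Int) : Prop := ¬(budgets = [] ∧ 0 ≤ M)
instance (budgets : List Int) (M : Int) : Decidable (Pre_solution budgets M) := by unfold Pre_solution; infer_instance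
def pvWitness_solution : List Int × Int := ([1, 2, 5], 6)

def Spec_solution (budgets : List Int) (M : Int) (out : Int) : Prop := out = solution_alt budgets M
instance (budgets : List Int) (M : Int) (out : Int) : Decidable (Spec_solution budgets M out) := by unfold Spec_solution; infer_instance

-- ===== CLAIM (what is proved, stated in full; the proofs are below) =====
def Claim_equal_solution : Prop := ∀ (budgets : List Int) (M : Int), Dom_solution budgets M → Pre_solution budgets M → Spec_solution budgets M (solution budgets M)

-- ===== LEMMAS AND PROOFS =====

-- F l c = sum of min(x, c): the capped total both programs reason about
def capF (l : List Int) (c : Int) : Int := (l.map (fun x => min x c)).sum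

-- characterisation of the answer: r is 0 and no cap ≥ 1 fits, or r is the largest fitting cap in [1, M]
def GoodAns (budgets : List Int) (M r : Int) : Prop :=
  (r = 0 ∧ (M < 1 ∨ M < capF budgets 1)) ∨
  (1 ≤ r ∧ r ≤ M ∧ capF budgets r ≤ M ∧ (r = M ∨ M < capF budgets (r + 1)))

theorem capF_cons (x : Int) (l : List Int) (c : Int) :
    capF (x :: l) c = min x c + capF l c := by
  simp [capF]

theorem capF_append (a b : List Int) (c : Int) : capF (a ++ b) c = capF a c + capF b c := by
  simp [capF]

theorem capF_mono (l : List Int) {c c' : Int} (h : c ≤ c') : capF l c ≤ capF l c' := by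
  induction l with
  | nil => simp [capF]
  | cons x t ih =>
      rw [capF_cons, capF_cons]
      have : min x c ≤ min x c' := by omega
      omega

theorem capF_perm {l l' : List Int} (h : l.Perm l') (c : Int) : capF l c = capF l' c := by
  exact List.Perm.sum_eq (h.map _)

theorem capF_all_le {l : List Int} {c : Int} (h : ∀ y ∈ l, y ≤ c) : capF l c = l.sum := by
  induction l with
  | nil => simp [capF]
  | cons x t ih =>
      rw [capF_cons, ih (fun y hy => h y (List.mem_cons_of_mem _ hy)), List.sum_cons]
      have := h x (List.mem_cons_self ..)
      omega

theorem capF_all_ge {l : List Int} {c : Int} (h : ∀ y ∈ l, c ≤ y) : capF l c = (l.length : Int) * c := by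
  induction l with
  | nil => simp [capF]
  | cons x t ih =>
      rw [capF_cons, ih (fun y hy => h y (List.mem_cons_of_mem _ hy))]
      have := h x (List.mem_cons_self ..)
      have : min x c = c := by omega
      rw [this]
      simp only [List.length_cons]
      push_cast
      ring

theorem sumCapped_go (budgets : List Int) (mid : Int) :
    ∀ s : Int, budgets.foldl (fun s x => if mid ≥ x then s + x else s + mid) s = s + capF budgets mid := by
  induction budgets with
  | nil => intro s; simp [capF]
  | cons x t ih =>
      intro s
      rw [List.foldl_cons, ih, capF_cons]
      by_cases h : mid ≥ x
      · simp only [if_pos h]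
        have : min x mid = x := by omega
        omega
      · simp only [if_neg h]
        have : min x mid = mid := by omega
        omega

theorem sumCapped_eq (budgets : List Int) (mid : Int) : sumCapped budgets mid = capF budgets mid := by
  have := sumCapped_go budgets mid 0
  simpa [sumCapped] using this

-- the characterisation pins the value down
theorem goodAns_unique (budgets : List Int) (M r1 r2 : Int)
    (h1 : GoodAns budgets M r1) (h2 : GoodAns budgets M r2) : r1 = r2 := by
  rcases h1 with ⟨e1, h1⟩ | ⟨hr1, hr1M, hP1, hlast1⟩ <;>
    rcases h2 with ⟨e2, h2⟩ | ⟨hr2, hr2M, hP2, hlast2⟩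
  · omega
  · exfalso
    rcases h1 with h | h
    · omega
    · have := capF_mono budgets (c := 1) (c' := r2) hr2
      omega
  · exfalso
    rcases h2 with h | h
    · omega
    · have := capF_mono budgets (c := 1) (c' := r1) hr1
      omega
  · by_contra hne
    rcases Int.lt_or_lt_of_ne hne with hlt | hlt
    · rcases hlast1 with h | h
      · omega
      · have := capF_mono budgets (c := r1 + 1) (c' := r2) (by omega)
        omega
    · rcases hlast2 with h | h
      · omega
      · have := capF_mono budgets (c := r2 + 1) (c' := r1) (by omega)
        omega

-- A's binary search satisfies GoodAns
theorem solLoop_good (budgets : List Int) (M : Int) :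
    ∀ (fuel : Nat) (answer l r : Int), (r + 1 - l).toNat = fuel → 1 ≤ l → l ≤ r + 1 → r ≤ M →
      ((answer = 0 ∧ l = 1) ∨ (1 ≤ answer ∧ answer = l - 1 ∧ capF budgets answer ≤ M)) →
      (∀ c, r < c → c ≤ M → M < capF budgets c) →
      GoodAns budgets M (solLoop budgets M answer l r) := by
  intro fuel
  induction fuel using Nat.strong_induction_on with
  | _ fuel ih =>
    intro answer l r hfuel hl1 hlr hrM hans hr
    rw [solLoop]
    split
    · rename_i hle
      have hmid := PySem.Int.floordiv_two_mid_bounds (lo := l) (hi := r) hle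
      rw [Int.add_comm] at hmid
      set mid := PySem.Int.floordiv (r + l) 2 with hmiddef
      split
      · rename_i hs
        rw [sumCapped_eq] at hs
        exact ih (mid - 1 + 1 - l).toNat (by omega) answer l (mid - 1) rfl
          hl1 (by omega) (by omega) hans
          (fun c hc hcM => by
            rcases le_or_gt c r with h | h
            · have := capF_mono budgets (c := mid) (c' := c) (by omega)
              omega
            · exact hr c h hcM)
      · rename_i hs
        rw [sumCapped_eq] at hs
        push_neg at hs
        exact ih (r + 1 - (mid + 1)).toNat (by omega) mid (mid + 1) r rfl
          (by omega) (by omega) hrM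
          (Or.inr ⟨by omega, by omega, by omega⟩) hr
    · rename_i hgt
      push_neg at hgt
      rcases hans with ⟨ha0, hl⟩ | ⟨ha1, hal, haP⟩
      · left
        refine ⟨ha0, ?_⟩
        rcases le_or_gt 1 M with h | h
        · exact Or.inr (hr 1 (by omega) (by omega))
        · exact Or.inl h
      · right
        refine ⟨ha1, by omega, haP, ?_⟩
        rcases eq_or_lt_of_le (show answer ≤ M by omega) with h | h
        · exact Or.inl h
        · exact Or.inr (hr (answer + 1) (by omega) (by omega))

-- the floor-division bracket used by B
theorem fdiv_bracket {M pfx k : Int} (hk : 0 < k) (c : Int) :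
    c ≤ PySem.Int.floordiv (M - pfx) k ↔ pfx + k * c ≤ M := by
  rw [PySem.Int.le_floordiv_iff_mul_le hk]
  constructor <;> intro h <;> linarith [mul_comm c k]

-- B's scan satisfies GoodAns
theorem altLoop_good (budgets : List Int) (M : Int) (bs : List Int)
    (hperm : bs.Perm budgets) (hsort : bs.Pairwise (fun a b => a ≤ b)) (hsum : M < budgets.sum) :
    ∀ (suffix done : List Int), bs = done ++ suffix →
      (∀ y ∈ done, done.sum + (suffix.length : Int) * y ≤ M) →
      GoodAns budgets M (altLoop M (bs.length : Int) suffix (done.length : Int) done.sum) := by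
  intro suffix
  induction suffix with
  | nil =>
      intro done hsplit hall
      have hz : altLoop M (bs.length : Int) [] (done.length : Int) done.sum = 0 := rfl
      rw [hz]
      rcases done with _ | ⟨y, t⟩
      · have hbe : bs = [] := by simpa using hsplit
        have hb0 : budgets.sum = 0 := by
          have := hperm.sum_eq
          rw [hbe] at this
          simpa using this.symm
        exact Or.inl ⟨rfl, Or.inl (by omega)⟩
      · exfalso
        have hy := hall y (List.mem_cons_self ..)
        simp only [List.length_nil, Nat.cast_zero, zero_mul, add_zero, List.sum_cons] at hy
        have hbs : bs.sum = budgets.sum := hperm.sum_eq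
        rw [hsplit] at hbs
        simp only [List.append_nil, List.sum_cons] at hbs
        omega
  | cons x rest ihs =>
      intro done hsplit hall
      rw [altLoop]
      have hlen : (bs.length : Int) - (done.length : Int) = ((x :: rest).length : Int) := by
        rw [hsplit, List.length_append]
        push_cast
        ring
      set k : Int := (bs.length : Int) - (done.length : Int) with hkdef
      have hkpos : 0 < k := by
        rw [hlen]
        simp only [List.length_cons]
        push_cast
        omega
      -- sortedness facts
      have hdx : ∀ y ∈ done, y ≤ x := by
        intro y hy
        have := (List.pairwise_append.mp (hsplit ▸ hsort)).2.2
        exact this y hy x (List.mem_cons_self ..)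
      have hrx : ∀ y ∈ x :: rest, x ≤ y := by
        intro y hy
        rcases List.mem_cons.mp hy with rfl | hy
        · exact le_refl _
        · exact ((List.pairwise_cons.mp (List.pairwise_append.mp (hsplit ▸ hsort)).2.1).1) y hy
      -- capF is linear on the segment below x and above done
      have hF : ∀ c, (∀ y ∈ done, y ≤ c) → c ≤ x → capF budgets c = done.sum + k * c := by
        intro c hdc hcx
        rw [← capF_perm hperm c, hsplit, capF_append,
          capF_all_le hdc,
          capF_all_ge (fun y hy => le_trans hcx (hrx y hy))]
        rw [hlen]
      split
      · rename_i hfire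
        set c0 : Int := PySem.Int.floordiv (M - done.sum) k with hc0def
        have hbr : ∀ c : Int, c ≤ c0 ↔ done.sum + k * c ≤ M := by
          intro c
          rw [hc0def]
          exact fdiv_bracket hkpos c
        have hxc0 : c0 < x := by
          by_contra h
          have := (hbr x).mp (by omega)
          omega
        have hdc0 : ∀ y ∈ done, y ≤ c0 := by
          intro y hy
          refine (hbr y).mpr ?_
          have := hall y hy
          rw [← hlen] at this
          omega
        rcases le_or_gt (min M c0) 0 with hcase | hcase
        · have hres : max 0 (min M c0) = 0 := by omega
          rw [hres]
          left
          refine ⟨rfl, ?_⟩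
          rcases le_or_gt 1 M with h | h
          · right
            have hc01 : c0 < 1 := by omega
            rcases le_or_gt x 1 with hx1 | hx1
            · have hx : capF budgets x = done.sum + k * x := hF x hdx (le_refl x)
              have := capF_mono budgets (c := x) (c' := 1) hx1
              omega
            · have h1 : capF budgets 1 = done.sum + k * 1 :=
                hF 1 (fun y hy => by have := hdc0 y hy; omega) (by omega)
              have := (hbr 1).not.mp (by omega)
              omega
          · exact Or.inl h
        · have hres : max 0 (min M c0) = min M c0 := by omega
          rw [hres]
          right
          have hPc0 : capF budgets c0 ≤ M := by
            rw [hF c0 hdc0 (by omega)]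
            exact (hbr c0).mp (le_refl c0)
          refine ⟨by omega, by omega, ?_, ?_⟩
          · exact le_trans (capF_mono budgets (c := min M c0) (c' := c0) (by omega)) hPc0
          · rcases le_or_gt M c0 with h | h
            · exact Or.inl (by omega)
            · right
              have hmineq : min M c0 = c0 := by omega
              rw [hmineq]
              have h1 : capF budgets (c0 + 1) = done.sum + k * (c0 + 1) :=
                hF (c0 + 1) (fun y hy => by have := hdc0 y hy; omega) (by omega)
              have := (hbr (c0 + 1)).not.mp (by omega)
              omega
      · rename_i hfire
        push_neg at hfire
        have hsplit' : bs = (done ++ [x]) ++ rest := by rw [hsplit]; simp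
        have hstep := ihs (done ++ [x]) hsplit' ?_
        · have e1 : ((done ++ [x]).length : Int) = (done.length : Int) + 1 := by
            simp
          have e2 : (done ++ [x]).sum = done.sum + x := by simp
          rw [e1, e2] at hstep
          exact hstep
        · intro y hy
          have e2 : (done ++ [x]).sum = done.sum + x := by simp
          rw [e2]
          have hkr : ((rest.length : Int)) = k - 1 := by
            rw [hlen]
            simp only [List.length_cons]
            push_cast
            ring
          rw [hkr]
          rcases List.mem_append.mp hy with hy | hy
          · have hyx := hdx y hy
            have hyM := hall y hy
            rw [← hlen] at hyM
            nlinarith [mul_nonneg (by omega : (0:ℤ) ≤ k - 1) (by omega : (0:ℤ) ≤ x - y)]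
          · have hyeq : y = x := by simpa using hy
            subst hyeq
            nlinarith [hfire]

-- the branches of both tops agree
theorem main_eq (budgets : List Int) (M : Int) : solution budgets M = solution_alt budgets M := by
  unfold solution solution_alt
  split
  · rfl
  · rename_i hsum
    push_neg at hsum
    set bs := PySem.List.sorted budgets (fun y => y) with hbs
    have hperm : bs.Perm budgets := PySem.List.sorted_perm budgets (fun y => y) false
    have hsort : bs.Pairwise (fun a b => a ≤ b) := PySem.List.sorted_pairwise budgets (fun y => y)
    have hgoodB : GoodAns budgets M (altLoop M (budgets.length : Int) bs 0 0) := by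
      have hlen : (budgets.length : Int) = (bs.length : Int) := by rw [hperm.length_eq]
      rw [hlen]
      have := altLoop_good budgets M bs hperm hsort hsum bs [] (by simp) (by simp)
      simpa using this
    rcases le_or_gt 1 M with hM | hM
    · have hgoodA : GoodAns budgets M (solLoop budgets M 0 1 M) :=
        solLoop_good budgets M (M + 1 - 1).toNat 0 1 M rfl (by omega) (by omega) (le_refl M)
          (Or.inl ⟨rfl, rfl⟩) (fun c hc hcM => by omega)
      exact goodAns_unique budgets M _ _ hgoodA hgoodB
    · have hA : solLoop budgets M 0 1 M = 0 := by
        rw [solLoop, dif_neg (by omega : ¬ (1 : Int) ≤ M)]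
      rw [hA]
      exact goodAns_unique budgets M 0 _ (Or.inl ⟨rfl, Or.inl hM⟩) hgoodB

-- ===== VERDICT (by name: the statement is the Claim_ definition above) =====
theorem solution_spec : Claim_equal_solution := by
  intro budgets M _ _
  unfold Spec_solution
  exact main_eq budgets M
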